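-- pv_equiv track=rewrite | github.com/akhilkammila/leetcode-screenshotter | editorial_code/1-999/043. Multiply Strings/python3-1.py | multiplyOneDigit
-- ===== SOURCE A (Python) =====
-- def multiplyOneDigit(first_number: str, digit2: str, num_zeros: int):
--     # Insert 0s at the beginning based on the current digit's place.
--     currentResult = [0] * num_zeros
--     carry = 0
--
--     # Multiply firstNumber with the current digit of secondNumber.
--     for digit1 in first_number:
--         multiplication = int(digit1) * int(digit2) + carry
--         # Set carry equal to the tens place digit of multiplication.
--         carry = multiplication // 10
--         # Append the ones place digit of multiplication to the current result.
--         currentResult.append(multiplication % 10)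
--
--     if carry != 0:
--         currentResult.append(carry)
--     return currentResult
-- ===== SOURCE B (Python) =====
-- def multiplyOneDigit(first_number: str, digit2: str, num_zeros: int):
--     # Recursive decomposition: build the product digits front-to-back by
--     # structural recursion on the digit string, threading the carry; the final
--     # carry is emitted by the base case. No mutable accumulator list.
--     def go(digits, carry):
--         if not digits:
--             return [carry] if carry else []
--         m = int(digits[0]) * int(digit2) + carry
--         return [m % 10] + go(digits[1:], m // 10)
--     return [0] * num_zeros + go(first_number, 0)
-- ===== Notes on version B (the rewrite author's own statement) =====
-- stated objective: alternative
-- what changed: A mutates one accumulator list in an imperative loop and appends the final carry afterwards; B is a pure structural recursion over the digit string that builds the result front-to-back by consing, with the final carry emitted by the recursion's base case.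
import Mathlib
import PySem

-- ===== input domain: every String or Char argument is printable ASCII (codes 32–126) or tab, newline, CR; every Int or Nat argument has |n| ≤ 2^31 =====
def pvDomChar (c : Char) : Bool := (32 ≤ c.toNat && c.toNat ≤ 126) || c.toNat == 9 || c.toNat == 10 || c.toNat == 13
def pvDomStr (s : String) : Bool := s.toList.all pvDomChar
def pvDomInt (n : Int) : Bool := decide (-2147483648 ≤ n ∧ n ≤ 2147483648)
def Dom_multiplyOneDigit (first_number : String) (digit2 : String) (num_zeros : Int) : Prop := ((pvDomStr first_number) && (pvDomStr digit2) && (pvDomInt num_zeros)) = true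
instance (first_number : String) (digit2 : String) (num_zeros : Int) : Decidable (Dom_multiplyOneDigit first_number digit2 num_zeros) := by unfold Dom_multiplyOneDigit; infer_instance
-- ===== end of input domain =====

-- B replaces A's imperative accumulator loop (append per digit, carry appended after
-- the loop) by a pure structural recursion that conses digits front-to-back, the final
-- carry emitted by the base case; same return value, alternative decomposition.

-- int(s) as a total helper; Pre_ guarantees the parse succeeds wherever it is reached.
def pyInt (s : String) : Int := (PySem.Int.ofStr? s).getD 0

-- int(ch) for a one-character string
def pyIntChar (c : Char) : Int := (PySem.Int.ofChars? [c]).getD 0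

-- ===== PORT A =====
def multiplyOneDigit (first_number : String) (digit2 : String) (num_zeros : Int) : List Int :=
  -- currentResult = [0] * num_zeros ; carry = 0
  let init : List Int := List.replicate num_zeros.toNat 0
  -- for digit1 in first_number: multiplication = int(digit1) * int(digit2) + carry; …
  let s := first_number.toList.foldl
    (fun (st : List Int × Int) digit1 =>
      let multiplication := pyIntChar digit1 * pyInt digit2 + st.2
      (st.1 ++ [PySem.Int.mod multiplication 10], PySem.Int.floordiv multiplication 10))
    (init, 0)
  if s.2 ≠ 0 then s.1 ++ [s.2] else s.1

-- ===== PORT B =====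
-- go(digits, carry): base case emits the remaining carry; otherwise cons the ones
-- digit onto the recursive result.
def altGo (digit2 : String) : List Char → Int → List Int
  | [], carry => if carry ≠ 0 then [carry] else []
  | d :: rest, carry =>
    let m := pyIntChar d * pyInt digit2 + carry
    PySem.Int.mod m 10 :: altGo digit2 rest (PySem.Int.floordiv m 10)

def multiplyOneDigit_alt (first_number : String) (digit2 : String) (num_zeros : Int) : List Int :=
  List.replicate num_zeros.toNat 0 ++ altGo digit2 first_number.toList 0

-- ===== PRECONDITION & SPEC =====
-- Pre_ = exactly where Python A returns: every character of first_number is a decimal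
-- digit (int(digit1) raises otherwise), and int(digit2) parses unless the loop is empty.
def Pre_multiplyOneDigit (first_number : String) (digit2 : String) (num_zeros : Int) : Prop :=
  first_number.toList.all Char.isDigit = true ∧
  (first_number.toList.isEmpty = true ∨ (PySem.Int.ofStr? digit2).isSome = true)
instance (first_number : String) (digit2 : String) (num_zeros : Int) : Decidable (Pre_multiplyOneDigit first_number digit2 num_zeros) := by unfold Pre_multiplyOneDigit; infer_instance

def pvWitness_multiplyOneDigit : String × String × Int := ("409", "7", 2)

def Spec_multiplyOneDigit (first_number : String) (digit2 : String) (num_zeros : Int) (out : List Int) : Prop := out = multiplyOneDigit_alt first_number digit2 num_zeros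
instance (first_number : String) (digit2 : String) (num_zeros : Int) (out : List Int) : Decidable (Spec_multiplyOneDigit first_number digit2 num_zeros out) := by unfold Spec_multiplyOneDigit; infer_instance

-- ===== CLAIM (what is proved, stated in full; the proofs are below) =====
def Claim_equal_multiplyOneDigit : Prop := ∀ (first_number : String) (digit2 : String) (num_zeros : Int), Dom_multiplyOneDigit first_number digit2 num_zeros → Pre_multiplyOneDigit first_number digit2 num_zeros → Spec_multiplyOneDigit first_number digit2 num_zeros (multiplyOneDigit first_number digit2 num_zeros)

-- ===== LEMMAS AND PROOFS =====

-- core invariant: A's fold over (accumulator, carry), followed by the final-carry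
-- append, equals the accumulator prefixed onto B's recursion started at that carry.
lemma pv_loop (d2 : String) (l : List Char) (acc : List Int) (c : Int) :
    (let s := l.foldl
        (fun (st : List Int × Int) digit1 =>
          let m := pyIntChar digit1 * pyInt d2 + st.2
          (st.1 ++ [PySem.Int.mod m 10], PySem.Int.floordiv m 10)) (acc, c)
     if s.2 ≠ 0 then s.1 ++ [s.2] else s.1)
    = acc ++ altGo d2 l c := by
  induction l generalizing acc c with
  | nil =>
    simp only [List.foldl_nil, altGo]
    split_ifs <;> simp
  | cons d rest ih =>
    simp only [List.foldl_cons, altGo]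
    rw [ih]
    simp

-- ===== VERDICT (by name: the statement is the Claim_ definition above) =====
theorem multiplyOneDigit_spec : Claim_equal_multiplyOneDigit := by
  intro fn d2 nz _ _
  unfold Spec_multiplyOneDigit multiplyOneDigit multiplyOneDigit_alt
  exact pv_loop d2 fn.toList (List.replicate nz.toNat 0) 0
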